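-- pv_equiv track=rewrite | github.com/bredmond1019/graphql-mcp-server | src/healthie_mcp/tools/api_usage_analytics.py | _count_batch_operations
-- ===== SOURCE A (Python) =====
-- from typing import Dict, List, Optional, Any, Tuple
--
-- def _count_batch_operations(usage_data: Dict[str, Any],
--                            config: Dict[str, Any]) -> int:
--     """Count batch operation patterns."""
--     # Simplified implementation
--     operations = usage_data.get("operations", [])
--     batch_count = 0
--
--     # Count sequences of 3 or more consecutive similar operations
--     if len(operations) >= 3:
--         current_op = None
--         consecutive_count = 0
--
--         for op in operations:
--             op_name = op.get("name")
--             if op_name == current_op: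
--                 consecutive_count += 1
--                 # Count each unique batch of 3 consecutive operations
--                 if consecutive_count >= 3 and consecutive_count == 3:
--                     batch_count += 1
--             else:
--                 current_op = op_name
--                 consecutive_count = 1
--
--     return batch_count
-- ===== SOURCE B (Python) =====
-- def _count_batch_operations(usage_data, config):
--     """Count batch operation patterns."""
--     names = [op.get("name") for op in usage_data.get("operations", [])]
--     return sum(1 for i in range(len(names) - 2)
--                if names[i] == names[i + 1] == names[i + 2]
--                and (i == 0 or names[i - 1] != names[i]))
-- ===== Notes on version B (the rewrite author's own statement) =====
-- stated objective: alternative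
-- what changed: Replaces A's stateful streaming scan (current name, consecutive counter, trigger at exactly 3) with a stateless positional formulation: build the name list, then count indices i where names[i]==names[i+1]==names[i+2] and i is not preceded by the same name, i.e. the starts of maximal runs of length >= 3.
import Mathlib
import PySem

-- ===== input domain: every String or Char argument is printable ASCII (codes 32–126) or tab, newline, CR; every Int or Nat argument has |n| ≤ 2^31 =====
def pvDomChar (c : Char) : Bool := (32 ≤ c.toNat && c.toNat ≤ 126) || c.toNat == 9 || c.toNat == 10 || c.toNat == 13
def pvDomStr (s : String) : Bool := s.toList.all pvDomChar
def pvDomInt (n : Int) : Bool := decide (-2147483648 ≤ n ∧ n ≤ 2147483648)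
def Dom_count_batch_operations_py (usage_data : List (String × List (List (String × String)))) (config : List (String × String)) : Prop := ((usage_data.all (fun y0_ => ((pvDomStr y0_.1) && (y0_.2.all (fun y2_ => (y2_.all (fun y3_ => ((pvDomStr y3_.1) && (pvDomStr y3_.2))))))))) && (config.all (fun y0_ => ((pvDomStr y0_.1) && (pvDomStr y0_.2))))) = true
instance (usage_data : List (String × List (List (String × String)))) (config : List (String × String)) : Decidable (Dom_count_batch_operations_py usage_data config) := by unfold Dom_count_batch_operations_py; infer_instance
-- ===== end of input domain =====

-- B replaces A's stateful run-length counter with a stateless positional test: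
-- it counts indices i that start a maximal run of ≥ 3 equal names (alternative; same cost).

-- ===== PORT A =====
-- literal port of A's loop: state = (current_op, consecutive_count, batch_count)
def count_batch_operations_py (usage_data : List (String × List (List (String × String)))) (config : List (String × String)) : Int :=
  let operations := PySem.Dict.getD (PySem.Dict.mk usage_data) "operations" []
  if 3 ≤ operations.length then
    let st := operations.foldl
      (fun (st : Option String × Int × Int) op =>
        let op_name := PySem.Dict.get? (PySem.Dict.mk op) "name"
        if op_name = st.1 then
          let cc := st.2.1 + 1
          (st.1, cc, st.2.2 + (if 3 ≤ cc ∧ cc = 3 then 1 else 0))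
        else
          (op_name, 1, st.2.2))
      (none, 0, 0)
    st.2.2
  else 0

-- ===== PORT B =====
-- port of Source B: names list, then a count over range(len(names)-2) of the window
-- predicate names[i]==names[i+1]==names[i+2] and (i==0 or names[i-1]!=names[i]);
-- all indices accessed are in range there, so getElem? equality is exact
def count_batch_operations_py_alt (usage_data : List (String × List (List (String × String)))) (config : List (String × String)) : Int :=
  let names := (PySem.Dict.getD (PySem.Dict.mk usage_data) "operations" []).map
      (fun op => PySem.Dict.get? (PySem.Dict.mk op) "name")
  ((List.range (names.length - 2)).countP (fun i =>
      (names[i]? == names[i+1]?) && (names[i+1]? == names[i+2]?) &&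
      (i == 0 || !(names[i-1]? == names[i]?))) : Nat)

-- ===== PRECONDITION & SPEC =====
def Spec_count_batch_operations_py (usage_data : List (String × List (List (String × String)))) (config : List (String × String)) (out : Int) : Prop := out = count_batch_operations_py_alt usage_data config
instance (usage_data : List (String × List (List (String × String)))) (config : List (String × String)) (out : Int) : Decidable (Spec_count_batch_operations_py usage_data config out) := by unfold Spec_count_batch_operations_py; infer_instance

-- ===== CLAIM (what is proved, stated in full; the proofs are below) =====
def Claim_equal_count_batch_operations_py : Prop := ∀ (usage_data : List (String × List (List (String × String)))) (config : List (String × String)), Dom_count_batch_operations_py usage_data config → Spec_count_batch_operations_py usage_data config (count_batch_operations_py usage_data config)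

-- ===== LEMMAS AND PROOFS =====

-- A's loop body over the key list (A computes the key inside the fold; List.foldl_map bridges)
def pvStepA (st : Option String × Int × Int) (k : Option String) : Option String × Int × Int :=
  if k = st.1 then
    let cc := st.2.1 + 1
    (st.1, cc, st.2.2 + (if 3 ≤ cc ∧ cc = 3 then 1 else 0))
  else
    (k, 1, st.2.2)

-- A's batch count as a recursion over the key list (current key k, current run count c)
def pvG (k : Option String) (c : Int) : List (Option String) → Int
  | [] => 0
  | x :: t => if x = k then (if c + 1 = 3 then 1 else 0) + pvG k (c + 1) t else pvG x 1 t

-- number of leading elements equal to k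
def pvLead (k : Option String) : List (Option String) → Nat
  | [] => 0
  | x :: t => if x = k then pvLead k t + 1 else 0

-- B's window count as a recursion: pvW prev l counts positions of l that start a
-- maximal run of ≥ 3 equal names, given the element before l (none at the start)
def pvW (prev : Option (Option String)) : List (Option String) → Nat
  | a :: b :: c :: t => (if a = b ∧ b = c ∧ prev ≠ some a then 1 else 0) + pvW (some a) (b :: c :: t)
  | _ => 0

theorem pvW_cons (prev : Option (Option String)) (x : Option String) (t : List (Option String)) :
    pvW prev (x :: t) = pvW (some x) t + (if prev ≠ some x ∧ 2 ≤ pvLead x t then 1 else 0) := by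
  match t with
  | [] => simp [pvW, pvLead]
  | [b] =>
    have : pvLead x [b] ≤ 1 := by by_cases h : b = x <;> simp [pvLead, h]
    simp [pvW]
    omega
  | b :: c :: t' =>
    show (if x = b ∧ b = c ∧ prev ≠ some x then 1 else 0) + pvW (some x) (b :: c :: t') = _
    have h2le : (2 ≤ pvLead x (b :: c :: t')) ↔ (b = x ∧ c = x) := by
      by_cases hb : b = x <;> by_cases hc : c = x <;> simp [pvLead, hb, hc]
    have hiff : (x = b ∧ b = c ∧ prev ≠ some x) ↔ (prev ≠ some x ∧ 2 ≤ pvLead x (b :: c :: t')) := by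
      rw [h2le]
      constructor
      · rintro ⟨h1, h2, h3⟩
        exact ⟨h3, h1.symm, (h1.trans h2).symm⟩
      · rintro ⟨h3, hb, hc⟩
        exact ⟨hb.symm, by rw [hb, hc], h3⟩
    rw [if_congr hiff rfl rfl]
    split_ifs <;> omega

theorem pvFold_eq_pvG (xs : List (Option String)) : ∀ (k : Option String) (c bc : Int),
    (xs.foldl pvStepA (k, c, bc)).2.2 = bc + pvG k c xs := by
  induction xs with
  | nil => intro k c bc; simp [pvG]
  | cons x t ih =>
    intro k c bc
    by_cases hx : x = k
    · rw [List.foldl_cons, show pvStepA (k, c, bc) x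
          = (k, c + 1, bc + (if 3 ≤ c + 1 ∧ c + 1 = 3 then 1 else 0)) from by simp [pvStepA, hx], ih]
      simp only [pvG, if_pos hx]
      split_ifs <;> simp_all <;> omega
    · rw [List.foldl_cons, show pvStepA (k, c, bc) x = (x, 1, bc) from by simp [pvStepA, hx], ih]
      simp [pvG, hx]

theorem pvG_eq_pvW (xs : List (Option String)) : ∀ (k : Option String) (c : Int), 1 ≤ c →
    pvG k c xs = (pvW (some k) xs : Int) + (if c < 3 ∧ 3 ≤ c + (pvLead k xs : Int) then 1 else 0) := by
  induction xs with
  | nil =>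
    intro k c hc
    simp only [pvG, pvW, pvLead]
    split_ifs <;> omega
  | cons x t ih =>
    intro k c hc
    by_cases hx : x = k
    · subst hx
      rw [show pvG x c (x :: t) = (if c + 1 = 3 then 1 else 0) + pvG x (c + 1) t from by
            simp [pvG], ih x (c + 1) (by omega),
          pvW_cons, show pvLead x (x :: t) = pvLead x t + 1 from by simp [pvLead]]
      have hne : ¬ ((some x : Option (Option String)) ≠ some x) := by simp
      simp only [hne, false_and, if_false]
      push_cast
      split_ifs <;> omega
    · rw [show pvG k c (x :: t) = pvG x 1 t from by simp [pvG, hx],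
          ih x 1 (by omega), pvW_cons,
          show pvLead k (x :: t) = if x = k then pvLead k t + 1 else 0 from rfl]
      have hne : (some k : Option (Option String)) ≠ some x := by simp [Ne.symm hx]
      rw [if_congr (iff_of_eq (by simp [hne] :
            ((some k ≠ some x ∧ 2 ≤ pvLead x t) : Prop) = (2 ≤ pvLead x t))) rfl rfl]
      simp only [if_neg hx]
      push_cast
      simp only [true_and]
      split_ifs <;> omega

-- the generalized window predicate with an explicit previous element
def pvPB (prev : Option (Option String)) (l : List (Option String)) (i : Nat) : Bool :=
  (l[i]? == l[i+1]?) && (l[i+1]? == l[i+2]?) &&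
  (if i = 0 then !(prev == l[0]?) else !(l[i-1]? == l[i]?))

theorem pvCount_eq_pvW (l : List (Option String)) : ∀ (prev : Option (Option String)),
    (List.range (l.length - 2)).countP (pvPB prev l) = pvW prev l := by
  induction l with
  | nil => intro prev; simp [pvW]
  | cons a rest ih =>
    intro prev
    match rest with
    | [] => simp [pvW]
    | [b] => simp [pvW]
    | b :: c :: t' =>
      have hlen : (a :: b :: c :: t').length - 2 = t'.length + 1 := by simp
      rw [hlen, List.range_succ_eq_map, List.countP_cons, List.countP_map]
      have hstep : ∀ i, pvPB prev (a :: b :: c :: t') (i + 1) = pvPB (some a) (b :: c :: t') i := by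
        intro i
        cases i with
        | zero => simp [pvPB]
        | succ j => simp [pvPB]
      have hcongr : List.countP (pvPB prev (a :: b :: c :: t') ∘ Nat.succ) (List.range t'.length)
          = List.countP (pvPB (some a) (b :: c :: t')) (List.range t'.length) := by
        apply List.countP_congr
        intro i _
        simp only [Function.comp_apply]
        rw [hstep i]
      have ih' : List.countP (pvPB (some a) (b :: c :: t')) (List.range t'.length)
          = pvW (some a) (b :: c :: t') := by
        have := ih (some a)
        simpa using this
      rw [hcongr, ih']
      rw [show pvW prev (a :: b :: c :: t')
          = (if a = b ∧ b = c ∧ prev ≠ some a then 1 else 0) + pvW (some a) (b :: c :: t') from rfl]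
      have hpb0 : (pvPB prev (a :: b :: c :: t') 0 = true) ↔ (a = b ∧ b = c ∧ prev ≠ some a) := by
        simp [pvPB, and_assoc]
      rw [if_congr hpb0 rfl rfl]
      split_ifs <;> omega

theorem pvMain (ops : List (List (String × String))) :
    (if 3 ≤ ops.length then
      (ops.foldl
        (fun (st : Option String × Int × Int) op =>
          let op_name := PySem.Dict.get? (PySem.Dict.mk op) "name"
          if op_name = st.1 then
            let cc := st.2.1 + 1
            (st.1, cc, st.2.2 + (if 3 ≤ cc ∧ cc = 3 then 1 else 0))
          else
            (op_name, 1, st.2.2))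
        (none, 0, 0)).2.2
    else 0)
    = (((List.range ((ops.map (fun op => PySem.Dict.get? (PySem.Dict.mk op) "name")).length - 2)).countP
        (fun i =>
          let names := ops.map (fun op => PySem.Dict.get? (PySem.Dict.mk op) "name")
          (names[i]? == names[i+1]?) && (names[i+1]? == names[i+2]?) &&
          (i == 0 || !(names[i-1]? == names[i]?))) : Nat) : Int) := by
  set names := ops.map (fun op => PySem.Dict.get? (PySem.Dict.mk op) "name") with hnames
  have hlen : names.length = ops.length := by simp [hnames]
  have hfold : ops.foldl
      (fun (st : Option String × Int × Int) op =>
        let op_name := PySem.Dict.get? (PySem.Dict.mk op) "name"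
        if op_name = st.1 then
          let cc := st.2.1 + 1
          (st.1, cc, st.2.2 + (if 3 ≤ cc ∧ cc = 3 then 1 else 0))
        else
          (op_name, 1, st.2.2))
      ((none : Option String), (0 : Int), (0 : Int))
      = names.foldl pvStepA (none, 0, 0) := by
    rw [hnames, List.foldl_map]
    rfl
  clear_value names
  by_cases h3 : 3 ≤ ops.length
  · -- B's predicate agrees with pvPB none names on the sampled range
    have hBpred : (List.range (names.length - 2)).countP (fun i =>
          (names[i]? == names[i+1]?) && (names[i+1]? == names[i+2]?) &&
          (i == 0 || !(names[i-1]? == names[i]?)))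
        = (List.range (names.length - 2)).countP (pvPB none names) := by
      apply List.countP_congr
      intro i hi
      have hi' : i < names.length - 2 := List.mem_range.mp hi
      cases i with
      | zero =>
        have h0 : 0 < names.length := by omega
        simp [pvPB, List.getElem?_eq_getElem h0]
      | succ j => simp [pvPB]
    rw [if_pos h3, hfold]
    show _ = (((List.range (names.length - 2)).countP (fun i =>
          (names[i]? == names[i+1]?) && (names[i+1]? == names[i+2]?) &&
          (i == 0 || !(names[i-1]? == names[i]?))) : Nat) : Int)
    rw [hBpred, pvCount_eq_pvW]
    cases hn : names with
    | nil => exfalso; rw [hn] at hlen; simp at hlen; omega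
    | cons x xs =>
      rw [pvFold_eq_pvG]
      have hG0 : pvG none 0 (x :: xs) = pvG x 1 xs := by
        by_cases hx : x = (none : Option String)
        · subst hx; simp [pvG]
        · simp [pvG, hx]
      rw [hG0, pvG_eq_pvW xs x 1 (by omega), pvW_cons]
      rw [if_congr (iff_of_eq (by simp :
            (((none : Option (Option String)) ≠ some x ∧ 2 ≤ pvLead x xs) : Prop)
              = (2 ≤ pvLead x xs))) rfl rfl]
      push_cast
      simp only [true_and]
      split_ifs <;> omega
  · rw [if_neg h3]
    rw [show names.length - 2 = 0 from by omega]
    simp [List.range_zero]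

theorem count_batch_eq (usage_data : List (String × List (List (String × String)))) (config : List (String × String)) :
    count_batch_operations_py usage_data config = count_batch_operations_py_alt usage_data config :=
  pvMain (PySem.Dict.getD (PySem.Dict.mk usage_data) "operations" [])

-- ===== VERDICT (by name: the statement is the Claim_ definition above) =====
theorem count_batch_operations_py_spec : Claim_equal_count_batch_operations_py := by
  intro usage_data config _
  unfold Spec_count_batch_operations_py
  exact count_batch_eq usage_data config
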